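-- pv_equiv track=rewrite | github.com/ccollado7/UNSAM---Python | 4. Aleatoridad/4.2 Random/ejercicio_4.8.py | lista_a_evaluar
-- ===== SOURCE A (Python) =====
-- def lista_a_evaluar(mano):
--     '''Funcion que recibe una mano aleatoria y devuelve una lista
--        para evaluar el tipo de envido'''
--     validas = [1, 2, 3, 4, 5, 6, 7]
--     lista_oro = []
--     lista_copa = []
--     lista_espada = []
--     lista_basto = []
--     for i in mano:
--         if (i[0] == 'oro') and (i[1] in validas):
--             lista_oro.append(i[1])
--         elif (i[0] == 'copa') and (i[1] in validas):
--             lista_copa.append(i[1])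
--         elif (i[0] == 'espada') and (i[1] in validas):
--             lista_espada.append(i[1])
--         elif (i[0] == 'basto') and (i[1] in validas):
--             lista_basto.append(i[1])
--
--     #Creo la lista final que voy a retornar
--     lista_final = []
--
--     #Condiciones para 'Oro'
--     if len(lista_oro) == 3:
--         lista_oro = sorted(lista_oro,reverse=True)
--         suma_oro = sum(lista_oro[0:2])
--         lista_final.append(suma_oro)
--     elif len(lista_oro) == 2:
--         suma_oro = sum(lista_oro)
--         lista_final.append(suma_oro)
--     else:
--         pass
--
--     #Condiciones para 'copa'
--     if len(lista_copa) == 3: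
--         lista_copa = sorted(lista_copa,reverse=True)
--         suma_copa = sum(lista_copa[0:2])
--         lista_final.append(suma_copa)
--     elif len(lista_copa) == 2:
--         suma_copa = sum(lista_copa)
--         lista_final.append(suma_copa)
--     else:
--         pass
--
--     #Condiciones para 'espada'
--     if len(lista_espada) == 3:
--         lista_espada = sorted(lista_espada,reverse=True)
--         suma_espada = sum(lista_espada[0:2])
--         lista_final.append(suma_espada)
--     elif len(lista_espada) == 2:
--         suma_espada = sum(lista_espada)
--         lista_final.append(suma_espada)
--     else:
--         pass
--
--     #Condiciones para 'basto'
--     if len(lista_basto) == 3: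
--         lista_basto = sorted(lista_basto,reverse=True)
--         suma_basto = sum(lista_basto[0:2])
--         lista_final.append(suma_basto)
--     elif len(lista_basto) == 2:
--         suma_basto = sum(lista_basto)
--         lista_final.append(suma_basto)
--     else:
--         pass
--
--     return lista_final
-- ===== SOURCE B (Python) =====
-- def lista_a_evaluar(mano):
--     '''Single parameterized loop over the four suits: filter each suit's
--        valid values from the hand, then apply one shared envido rule.'''
--     validas = (1, 2, 3, 4, 5, 6, 7)
--     lista_final = []
--     for palo in ('oro', 'copa', 'espada', 'basto'):
--         cartas = [v for p, v in mano if p == palo and v in validas]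
--         if len(cartas) in (2, 3):
--             lista_final.append(sum(sorted(cartas, reverse=True)[:2]))
--     return lista_final
-- ===== Notes on version B (the rewrite author's own statement) =====
-- stated objective: simpler
-- what changed: Replaces A's four-way if/elif grouping pass and four copy-pasted per-suit blocks by one parameterized loop over the fixed suit order, filtering each suit's valid values and applying a single shared envido rule sum(sorted(cartas, reverse=True)[:2]) for lengths 2 and 3.
import Mathlib
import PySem

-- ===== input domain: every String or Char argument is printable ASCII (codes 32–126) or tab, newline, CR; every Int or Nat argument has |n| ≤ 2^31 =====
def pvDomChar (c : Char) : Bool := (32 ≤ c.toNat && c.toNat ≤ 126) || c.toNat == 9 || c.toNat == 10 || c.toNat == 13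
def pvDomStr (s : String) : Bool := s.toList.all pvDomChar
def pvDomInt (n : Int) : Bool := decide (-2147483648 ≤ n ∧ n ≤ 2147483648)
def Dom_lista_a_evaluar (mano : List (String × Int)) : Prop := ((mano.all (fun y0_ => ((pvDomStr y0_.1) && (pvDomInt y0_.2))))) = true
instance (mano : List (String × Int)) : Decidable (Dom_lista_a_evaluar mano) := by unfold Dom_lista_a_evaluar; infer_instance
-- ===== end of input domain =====

-- B replaces A's four unrolled if/elif grouping branches and four repeated per-suit blocks
-- by one parameterized loop over the suit order with a per-suit filter and one shared rule (objective: simpler).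

-- ===== PORT A =====
def lista_a_evaluar (mano : List (String × Int)) : List Int :=
  let validas : List Int := [1, 2, 3, 4, 5, 6, 7]
  let st := mano.foldl
    (fun (st : List Int × List Int × List Int × List Int) i =>
      if i.1 = "oro" ∧ i.2 ∈ validas then (st.1 ++ [i.2], st.2.1, st.2.2.1, st.2.2.2)
      else if i.1 = "copa" ∧ i.2 ∈ validas then (st.1, st.2.1 ++ [i.2], st.2.2.1, st.2.2.2)
      else if i.1 = "espada" ∧ i.2 ∈ validas then (st.1, st.2.1, st.2.2.1 ++ [i.2], st.2.2.2)
      else if i.1 = "basto" ∧ i.2 ∈ validas then (st.1, st.2.1, st.2.2.1, st.2.2.2 ++ [i.2])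
      else st)
    ([], [], [], [])
  let lista_oro := st.1
  let lista_copa := st.2.1
  let lista_espada := st.2.2.1
  let lista_basto := st.2.2.2
  let lista_final : List Int := []
  let lista_final :=
    if lista_oro.length = 3 then
      lista_final ++ [(PySem.List.slice (PySem.List.sorted lista_oro (fun x => x) true) (some 0) (some 2)).sum]
    else if lista_oro.length = 2 then lista_final ++ [lista_oro.sum] else lista_final
  let lista_final :=
    if lista_copa.length = 3 then
      lista_final ++ [(PySem.List.slice (PySem.List.sorted lista_copa (fun x => x) true) (some 0) (some 2)).sum]
    else if lista_copa.length = 2 then lista_final ++ [lista_copa.sum] else lista_final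
  let lista_final :=
    if lista_espada.length = 3 then
      lista_final ++ [(PySem.List.slice (PySem.List.sorted lista_espada (fun x => x) true) (some 0) (some 2)).sum]
    else if lista_espada.length = 2 then lista_final ++ [lista_espada.sum] else lista_final
  let lista_final :=
    if lista_basto.length = 3 then
      lista_final ++ [(PySem.List.slice (PySem.List.sorted lista_basto (fun x => x) true) (some 0) (some 2)).sum]
    else if lista_basto.length = 2 then lista_final ++ [lista_basto.sum] else lista_final
  lista_final

-- ===== PORT B =====
def lista_a_evaluar_alt (mano : List (String × Int)) : List Int :=
  let validas : List Int := [1, 2, 3, 4, 5, 6, 7]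
  ["oro", "copa", "espada", "basto"].foldl
    (fun lista_final palo =>
      let cartas := (mano.filter (fun i => i.1 = palo ∧ i.2 ∈ validas)).map (·.2)
      if cartas.length = 2 ∨ cartas.length = 3 then
        lista_final ++ [(PySem.List.slice (PySem.List.sorted cartas (fun x => x) true) none (some 2)).sum]
      else lista_final)
    []

-- ===== PRECONDITION & SPEC =====
def Spec_lista_a_evaluar (mano : List (String × Int)) (out : List Int) : Prop := out = lista_a_evaluar_alt mano
instance (mano : List (String × Int)) (out : List Int) : Decidable (Spec_lista_a_evaluar mano out) := by unfold Spec_lista_a_evaluar; infer_instance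

-- ===== CLAIM (what is proved, stated in full; the proofs are below) =====
def Claim_equal_lista_a_evaluar : Prop := ∀ (mano : List (String × Int)), Dom_lista_a_evaluar mano → Spec_lista_a_evaluar mano (lista_a_evaluar mano)

-- ===== LEMMAS AND PROOFS =====

-- lifting an append out of A's per-suit if/elif block
theorem pv_append_if3 {a : Type} (acc x y : List a) (P Q : Prop) [Decidable P] [Decidable Q] :
    (if P then acc ++ x else if Q then acc ++ y else acc)
      = acc ++ (if P then x else if Q then y else []) := by
  split_ifs <;> simp

-- lifting an append out of B's loop body
theorem pv_append_if2 {a : Type} (acc x : List a) (P : Prop) [Decidable P] :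
    (if P then acc ++ x else acc) = acc ++ (if P then x else []) := by
  split_ifs <;> simp

-- A's four-accumulator grouping loop computes, suit by suit, the per-suit filters B uses.
theorem pv_fold_eq (mano : List (String × Int)) (o c e b : List Int) :
    mano.foldl
      (fun (st : List Int × List Int × List Int × List Int) i =>
        if i.1 = "oro" ∧ i.2 ∈ ([1,2,3,4,5,6,7] : List Int) then (st.1 ++ [i.2], st.2.1, st.2.2.1, st.2.2.2)
        else if i.1 = "copa" ∧ i.2 ∈ ([1,2,3,4,5,6,7] : List Int) then (st.1, st.2.1 ++ [i.2], st.2.2.1, st.2.2.2)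
        else if i.1 = "espada" ∧ i.2 ∈ ([1,2,3,4,5,6,7] : List Int) then (st.1, st.2.1, st.2.2.1 ++ [i.2], st.2.2.2)
        else if i.1 = "basto" ∧ i.2 ∈ ([1,2,3,4,5,6,7] : List Int) then (st.1, st.2.1, st.2.2.1, st.2.2.2 ++ [i.2])
        else st)
      (o, c, e, b)
    = (o ++ (mano.filter (fun i => i.1 = "oro" ∧ i.2 ∈ ([1,2,3,4,5,6,7] : List Int))).map (·.2),
       c ++ (mano.filter (fun i => i.1 = "copa" ∧ i.2 ∈ ([1,2,3,4,5,6,7] : List Int))).map (·.2),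
       e ++ (mano.filter (fun i => i.1 = "espada" ∧ i.2 ∈ ([1,2,3,4,5,6,7] : List Int))).map (·.2),
       b ++ (mano.filter (fun i => i.1 = "basto" ∧ i.2 ∈ ([1,2,3,4,5,6,7] : List Int))).map (·.2)) := by
  induction mano generalizing o c e b with
  | nil => simp
  | cons hd tl ih =>
    simp only [List.foldl_cons]
    by_cases h1 : hd.1 = "oro" ∧ hd.2 ∈ ([1,2,3,4,5,6,7] : List Int)
    · have m := h1.2
      simp only [List.mem_cons, List.not_mem_nil, or_false] at m
      rw [if_pos h1, ih]
      simp [h1, m]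
    · by_cases h2 : hd.1 = "copa" ∧ hd.2 ∈ ([1,2,3,4,5,6,7] : List Int)
      · have m := h2.2
        simp only [List.mem_cons, List.not_mem_nil, or_false] at m
        rw [if_neg h1, if_pos h2, ih]
        simp [h2, m]
      · by_cases h3 : hd.1 = "espada" ∧ hd.2 ∈ ([1,2,3,4,5,6,7] : List Int)
        · have m := h3.2
          simp only [List.mem_cons, List.not_mem_nil, or_false] at m
          rw [if_neg h1, if_neg h2, if_pos h3, ih]
          simp [h3, m]
        · by_cases h4 : hd.1 = "basto" ∧ hd.2 ∈ ([1,2,3,4,5,6,7] : List Int)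
          · have m := h4.2
            simp only [List.mem_cons, List.not_mem_nil, or_false] at m
            rw [if_neg h1, if_neg h2, if_neg h3, if_pos h4, ih]
            simp [h4, m]
          · have m1 := h1; have m2 := h2; have m3 := h3; have m4 := h4
            simp only [List.mem_cons, List.not_mem_nil, or_false] at m1 m2 m3 m4
            rw [if_neg h1, if_neg h2, if_neg h3, if_neg h4, ih]
            simp [m1, m2, m3, m4]

-- A's per-suit if/elif block equals B's shared rule, as the list appended for one suit.
theorem pv_block_eq (l : List Int) :
    (if l.length = 3 then
       [(PySem.List.slice (PySem.List.sorted l (fun x => x) true) (some 0) (some 2)).sum]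
     else if l.length = 2 then [l.sum] else ([] : List Int))
    = (if l.length = 2 ∨ l.length = 3 then
         [(PySem.List.slice (PySem.List.sorted l (fun x => x) true) none (some 2)).sum]
       else []) := by
  by_cases h3 : l.length = 3
  · simp [h3]
  · by_cases h2 : l.length = 2
    · have hperm := PySem.List.sorted_perm l (fun x => x) true
      have hlen : (PySem.List.sorted l (fun x => x) true).length = 2 := by
        rw [hperm.length_eq, h2]
      have hsl : PySem.List.slice (PySem.List.sorted l (fun x => x) true) none (some 2)
           = PySem.List.sorted l (fun x => x) true := by
        have h := PySem.List.slice_to_natCast (xs := PySem.List.sorted l (fun x => x) true) (b := 2)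
        simp only [Nat.cast_ofNat] at h
        rw [h, List.take_of_length_le (by omega)]
      simp [h2, hsl, hperm.sum_eq]
    · simp [h2, h3]

-- ===== VERDICT (by name: the statement is the Claim_ definition above) =====
theorem lista_a_evaluar_spec : Claim_equal_lista_a_evaluar := by
  intro mano _
  show lista_a_evaluar mano = lista_a_evaluar_alt mano
  simp only [lista_a_evaluar, lista_a_evaluar_alt, List.foldl_cons, List.foldl_nil]
  rw [pv_fold_eq]
  rw [pv_append_if3, pv_append_if3, pv_append_if3, pv_append_if3]
  rw [pv_append_if2, pv_append_if2, pv_append_if2, pv_append_if2]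
  rw [pv_block_eq, pv_block_eq, pv_block_eq, pv_block_eq]
  simp [List.append_assoc]
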